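-- pv_equiv track=rewrite | github.com/mf2hd-design/memoscan2 | scanner_discovery.py | build_tone_candidates
-- ===== SOURCE A (Python) =====
-- def build_tone_candidates(full_corpus: str, max_chars: int = 4000) -> str:
--     """
--     Extract a smaller, tone-focused slice from the corpus:
--     Prefer TITLE, H1, H2 lines and the first few paragraphs.
--     Fallback to the first max_chars characters.
--     """
--     try:
--         lines = full_corpus.splitlines()
--         signal = []
--         # Collect headings first
--         for ln in lines:
--             l = ln.strip()
--             if l.startswith(("TITLE:", "H1:", "H2:")):
--                 signal.append(l)
--         # Collect first ~10 paragraphs (lines starting with P: or plain text lines between headings)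
--         p_count = 0
--         for ln in lines:
--             l = ln.strip()
--             if l.startswith("P:"):
--                 signal.append(l)
--                 p_count += 1
--                 if p_count >= 12:
--                     break
--         text = "\n".join(signal)
--         if not text:
--             return full_corpus[:max_chars]
--         return text[:max_chars]
--     except Exception:
--         return full_corpus[:max_chars]
-- ===== SOURCE B (Python) =====
-- def build_tone_candidates(full_corpus: str, max_chars: int = 4000) -> str:
--     """Single pass: dispatch each stripped line into headings / capped paragraphs."""
--     try:
--         headings = []
--         paragraphs = []
--         p_count = 0
--         for ln in full_corpus.splitlines():
--             l = ln.strip()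
--             if l.startswith(("TITLE:", "H1:", "H2:")):
--                 headings.append(l)
--             if l.startswith("P:") and p_count < 12:
--                 paragraphs.append(l)
--                 p_count += 1
--         text = "\n".join(headings + paragraphs)
--         if not text:
--             return full_corpus[:max_chars]
--         return text[:max_chars]
--     except Exception:
--         return full_corpus[:max_chars]
-- ===== Notes on version B (the rewrite author's own statement) =====
-- stated objective: simpler
-- what changed: Replaces A's two passes over the lines (one collecting headings, one re-stripping every line to collect up to 12 paragraphs with a break) by a single pass that strips each line once and dispatches it into a headings list or a capped paragraphs list, concatenated afterwards.
import Mathlib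
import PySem

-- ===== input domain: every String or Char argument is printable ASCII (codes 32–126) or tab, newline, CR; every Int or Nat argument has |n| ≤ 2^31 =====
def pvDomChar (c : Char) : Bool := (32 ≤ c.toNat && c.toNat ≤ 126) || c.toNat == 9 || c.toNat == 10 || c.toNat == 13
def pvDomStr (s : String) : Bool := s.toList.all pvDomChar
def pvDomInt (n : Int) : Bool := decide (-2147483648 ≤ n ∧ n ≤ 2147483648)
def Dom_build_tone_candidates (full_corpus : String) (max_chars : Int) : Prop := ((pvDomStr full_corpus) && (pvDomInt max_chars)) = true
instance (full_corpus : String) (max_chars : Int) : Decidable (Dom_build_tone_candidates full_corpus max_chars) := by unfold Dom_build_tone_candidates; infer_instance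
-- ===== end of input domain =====

-- B replaces A's two passes over the lines by a single pass that strips each line once
-- and dispatches it into a headings list or a capped paragraphs list (objective: simpler).

-- ===== PORT A =====
-- second Python loop, with its break on the 12th paragraph, as structural recursion
def pvParasA : List String → List String → Nat → List String
  | [], signal, _ => signal
  | ln :: rest, signal, p_count =>
    let l := PySem.Str.strip ln
    if PySem.Str.startswith l "P:" then
      let signal' := signal ++ [l]
      let p_count' := p_count + 1
      if 12 ≤ p_count' then signal' else pvParasA rest signal' p_count'
    else pvParasA rest signal p_count

def build_tone_candidates (full_corpus : String) (max_chars : Int) : String :=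
  let lines := PySem.Str.splitlines full_corpus
  -- first loop: collect headings
  let signal := lines.foldl (fun signal ln =>
    let l := PySem.Str.strip ln
    if PySem.Str.startswith l "TITLE:" || PySem.Str.startswith l "H1:" || PySem.Str.startswith l "H2:" then
      signal ++ [l]
    else signal) []
  -- second loop: first 12 "P:" lines
  let signal := pvParasA lines signal 0
  let text := PySem.Str.join "\n" signal
  if text = "" then PySem.Str.slice full_corpus none (some max_chars)
  else PySem.Str.slice text none (some max_chars)

-- ===== PORT B =====
-- single pass: dispatch each stripped line into headings / capped paragraphs
def pvLoopB : List String → List String → List String → Nat → List String × List String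
  | [], headings, paragraphs, _ => (headings, paragraphs)
  | ln :: rest, headings, paragraphs, p_count =>
    let l := PySem.Str.strip ln
    let headings' := if PySem.Str.startswith l "TITLE:" || PySem.Str.startswith l "H1:" || PySem.Str.startswith l "H2:" then
        headings ++ [l]
      else headings
    if PySem.Str.startswith l "P:" && decide (p_count < 12) then
      pvLoopB rest headings' (paragraphs ++ [l]) (p_count + 1)
    else pvLoopB rest headings' paragraphs p_count

def build_tone_candidates_alt (full_corpus : String) (max_chars : Int) : String :=
  let hp := pvLoopB (PySem.Str.splitlines full_corpus) [] [] 0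
  let text := PySem.Str.join "\n" (hp.1 ++ hp.2)
  if text = "" then PySem.Str.slice full_corpus none (some max_chars)
  else PySem.Str.slice text none (some max_chars)

-- ===== PRECONDITION & SPEC =====
def Spec_build_tone_candidates (full_corpus : String) (max_chars : Int) (out : String) : Prop := out = build_tone_candidates_alt full_corpus max_chars
instance (full_corpus : String) (max_chars : Int) (out : String) : Decidable (Spec_build_tone_candidates full_corpus max_chars out) := by unfold Spec_build_tone_candidates; infer_instance

-- ===== CLAIM (what is proved, stated in full; the proofs are below) =====
def Claim_equal_build_tone_candidates : Prop := ∀ (full_corpus : String) (max_chars : Int), Dom_build_tone_candidates full_corpus max_chars → Spec_build_tone_candidates full_corpus max_chars (build_tone_candidates full_corpus max_chars)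

-- ===== LEMMAS AND PROOFS =====

-- pure characterisations of the loops
def pvH (lines : List String) : List String :=
  lines.filterMap (fun ln =>
    let l := PySem.Str.strip ln
    if PySem.Str.startswith l "TITLE:" || PySem.Str.startswith l "H1:" || PySem.Str.startswith l "H2:" then some l else none)

def pvP : List String → Nat → List String
  | [], _ => []
  | ln :: rest, p =>
    let l := PySem.Str.strip ln
    if PySem.Str.startswith l "P:" then
      if 12 ≤ p + 1 then [l] else l :: pvP rest (p + 1)
    else pvP rest p

def pvQ : List String → Nat → List String
  | [], _ => []
  | ln :: rest, p =>
    let l := PySem.Str.strip ln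
    if PySem.Str.startswith l "P:" && decide (p < 12) then l :: pvQ rest (p + 1) else pvQ rest p

theorem headsA_eq (lines : List String) (acc : List String) :
    lines.foldl (fun signal ln =>
      let l := PySem.Str.strip ln
      if PySem.Str.startswith l "TITLE:" || PySem.Str.startswith l "H1:" || PySem.Str.startswith l "H2:" then
        signal ++ [l]
      else signal) acc = acc ++ pvH lines := by
  induction lines generalizing acc with
  | nil => simp [pvH]
  | cons ln rest ih =>
    simp only [List.foldl_cons]
    rw [ih]
    simp only [pvH, List.filterMap_cons]
    split <;> simp

theorem parasA_eq (lines : List String) (sig : List String) (p : Nat) :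
    pvParasA lines sig p = sig ++ pvP lines p := by
  induction lines generalizing sig p with
  | nil => simp [pvParasA, pvP]
  | cons ln rest ih =>
    simp only [pvParasA, pvP]
    split
    · split
      · simp
      · simp [ih]
    · exact ih sig p

theorem loopB_eq (lines : List String) (hs ps : List String) (p : Nat) :
    pvLoopB lines hs ps p = (hs ++ pvH lines, ps ++ pvQ lines p) := by
  induction lines generalizing hs ps p with
  | nil => simp [pvLoopB, pvH, pvQ]
  | cons ln rest ih =>
    simp only [pvLoopB, pvH, pvQ, List.filterMap_cons]
    split
    · split <;> simp [ih, pvH]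
    · split <;> simp [ih, pvH]

theorem pvQ_of_ge (lines : List String) (p : Nat) (h : 12 ≤ p) : pvQ lines p = [] := by
  induction lines generalizing p with
  | nil => rfl
  | cons ln rest ih =>
    simp only [pvQ]
    have : ¬ p < 12 := by omega
    simp [this, ih p h]

theorem pvP_eq_pvQ (lines : List String) (p : Nat) (h : p < 12) : pvP lines p = pvQ lines p := by
  induction lines generalizing p with
  | nil => rfl
  | cons ln rest ih =>
    simp only [pvP, pvQ]
    by_cases hp : PySem.Str.startswith (PySem.Str.strip ln) "P:" = true
    · simp only [hp, if_pos, Bool.true_and, decide_eq_true_eq, h]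
      by_cases h12 : 12 ≤ p + 1
      · have : pvQ rest (p + 1) = [] := pvQ_of_ge rest (p + 1) h12
        simp [h12, this]
      · simp [h12, ih (p + 1) (by omega)]
    · simp at hp
      simp [hp]
      exact ih p h

-- ===== VERDICT (by name: the statement is the Claim_ definition above) =====
theorem pvP_zero_eq (lines : List String) : pvP lines 0 = pvQ lines 0 :=
  pvP_eq_pvQ lines 0 (by omega)

theorem build_tone_candidates_spec : Claim_equal_build_tone_candidates := by
  intro full_corpus max_chars _
  unfold Spec_build_tone_candidates build_tone_candidates build_tone_candidates_alt
  simp only [headsA_eq, parasA_eq, loopB_eq, pvP_zero_eq, List.nil_append]
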